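-- pv_equiv track=rewrite | github.com/FCP-INDI/C-PAC | CPAC/utils/utils.py | extract_txt
-- ===== SOURCE A (Python) =====
-- def extract_txt(list_timeseries):
--     """
--     Method to extract txt file containing
--     roi timeseries required for dual regression
--     """
--     if isinstance(list_timeseries, str):
--         if list_timeseries.endswith('.txt'):
--             return list_timeseries
--
--     out_file = None
--     for timeseries in list_timeseries:
--         if timeseries.endswith('.txt'):
--             out_file = timeseries
--
--     if not out_file:
--         raise Exception("Unable to retrieve roi timeseries txt"
--                         " file required for dual regression."
--                         " Existing files are:%s" % (list_timeseries))
--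
--     return out_file
-- ===== SOURCE B (Python) =====
-- def extract_txt(list_timeseries):
--     """Reverse early-exit scan: return the first '.txt' match from the end."""
--     if isinstance(list_timeseries, str):
--         if list_timeseries.endswith('.txt'):
--             return list_timeseries
--     for timeseries in reversed(list_timeseries):
--         if timeseries.endswith('.txt'):
--             return timeseries
--     raise Exception("Unable to retrieve roi timeseries txt"
--                     " file required for dual regression."
--                     " Existing files are:%s" % (list_timeseries))
-- ===== Notes on version B (the rewrite author's own statement) =====
-- stated objective: simpler
-- what changed: Replaces the forward full pass that keeps overwriting an accumulator with a reverse scan that returns at the first '.txt' match (early exit, no accumulator).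
import Mathlib
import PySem

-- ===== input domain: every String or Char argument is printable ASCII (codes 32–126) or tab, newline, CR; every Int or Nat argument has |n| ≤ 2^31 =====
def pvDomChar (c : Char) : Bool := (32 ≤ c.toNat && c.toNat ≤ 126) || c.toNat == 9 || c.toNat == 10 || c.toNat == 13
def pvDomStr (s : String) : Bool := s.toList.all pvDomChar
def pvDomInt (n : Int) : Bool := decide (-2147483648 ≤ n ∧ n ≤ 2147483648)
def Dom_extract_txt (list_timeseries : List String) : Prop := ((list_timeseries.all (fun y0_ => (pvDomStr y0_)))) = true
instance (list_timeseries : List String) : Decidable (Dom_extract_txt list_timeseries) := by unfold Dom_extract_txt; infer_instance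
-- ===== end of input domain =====

-- B: one honest line — reverse early-exit scan instead of a forward accumulating pass; objective: simpler.
-- ===== PORT A =====
-- forward loop overwriting out_file (Option String); 'not out_file' checks None or ""; on raise (outside Pre_) the port returns "".
def extract_txt (list_timeseries : List String) : String :=
  let out_file : Option String :=
    list_timeseries.foldl
      (fun acc timeseries =>
        if PySem.Str.endswith timeseries ".txt" then some timeseries else acc)
      none
  match out_file with
  | none => ""            -- Python raises Exception here (Pre_ excludes)
  | some s => if s == "" then "" else s  -- 'not out_file' is also true for "" (Pre_ excludes the raise)

-- ===== PORT B =====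
-- reversed(list) scanned for the first '.txt' match, returned immediately; no match = raise (outside Pre_), port returns "".
def extract_txt_alt (list_timeseries : List String) : String :=
  match list_timeseries.reverse.find? (fun t => PySem.Str.endswith t ".txt") with
  | some t => t
  | none => ""            -- Python raises Exception here (Pre_ excludes)

-- ===== PRECONDITION & SPEC =====
-- Pre_ excludes exactly the inputs where A (and B) raise: no element ends in '.txt'.
def Pre_extract_txt (list_timeseries : List String) : Prop :=
  ∃ s ∈ list_timeseries, PySem.Str.endswith s ".txt" = true
instance (list_timeseries : List String) : Decidable (Pre_extract_txt list_timeseries) := by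
  unfold Pre_extract_txt; infer_instance
def pvWitness_extract_txt : List String := (["a.txt"])
def Spec_extract_txt (list_timeseries : List String) (out : String) : Prop := out = extract_txt_alt list_timeseries
instance (list_timeseries : List String) (out : String) : Decidable (Spec_extract_txt list_timeseries out) := by unfold Spec_extract_txt; infer_instance

-- ===== CLAIM (what is proved, stated in full; the proofs are below) =====
def Claim_equal_extract_txt : Prop := ∀ (list_timeseries : List String), Dom_extract_txt list_timeseries → Pre_extract_txt list_timeseries → Spec_extract_txt list_timeseries (extract_txt list_timeseries)

-- ===== LEMMAS AND PROOFS =====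

-- ===== VERDICT (by name: the statement is the Claim_ definition above) =====
-- foldl last-match equals reverse-find? first-match, modulo an initial accumulator.
theorem foldl_lastMatch (p : String → Bool) (l : List String) (acc : Option String) :
    l.foldl (fun a t => if p t then some t else a) acc
      = (l.reverse.find? p).or acc := by
  induction l generalizing acc with
  | nil => simp
  | cons x xs ih =>
      simp only [List.foldl_cons, List.reverse_cons, List.find?_append, ih]
      cases h : xs.reverse.find? p <;> cases hp : p x <;> simp [List.find?, hp, Option.or]

theorem match_ne_empty (p : String → Bool) (hp : p "" = false) (l : List String) (t : String)
    (h : l.find? p = some t) : t ≠ "" := by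
  intro he; subst he
  have := List.find?_some h
  simp [hp] at this

theorem extract_txt_spec : Claim_equal_extract_txt := by
  intro l _ hpre
  unfold Spec_extract_txt extract_txt extract_txt_alt
  rw [foldl_lastMatch]
  obtain ⟨s, hs, hend⟩ := hpre
  have hmem : s ∈ l.reverse := by simpa using hs
  have hsome : (List.find? (fun timeseries =>
      PySem.Chars.endswith timeseries.toList ['.', 't', 'x', 't']) l.reverse).isSome :=
    List.find?_isSome.mpr ⟨s, hmem, by simpa [PySem.Str.endswith] using hend⟩
  obtain ⟨t, ht⟩ := Option.isSome_iff_exists.mp hsome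
  have hne : t ≠ "" := match_ne_empty _ (by decide) _ _ ht
  simp [ht, Option.or, hne]
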